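-- pv_equiv track=rewrite | github.com/aita/pycc | pycc/scanner.py | _validate_integer_constant_suffix
-- ===== SOURCE A (Python) =====
-- def _validate_integer_constant_suffix(suffix) -> bool:
--     i = 0
--     unsigned = False
--     long = False
--     while i < len(suffix):
--         c = suffix[i]
--         i += 1
--         if c in "uU" and not unsigned:
--             unsigned = True
--         elif c in "lL" and not long:
--             if i < len(suffix):
--                 c2 = suffix[i]
--                 if c2 == c:
--                     i += 1
--             long = True
--         else:
--             return False
--     return True
-- ===== SOURCE B (Python) =====
-- # Table lookup: the suffix grammar (optional 'u'/'U', optional same-case 'l'/'L'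
-- # group, in either order) denotes a finite language, precomputed once.
-- _VALID_SUFFIXES = frozenset(
--     u + l for u in ("", "u", "U") for l in ("", "l", "L", "ll", "LL")
-- ) | frozenset(
--     l + u for u in ("u", "U") for l in ("l", "L", "ll", "LL")
-- )
--
-- def _validate_integer_constant_suffix(suffix) -> bool:
--     return suffix in _VALID_SUFFIXES
-- ===== Notes on version B (the rewrite author's own statement) =====
-- stated objective: simpler
-- what changed: Replaces the stateful character-by-character DFA loop (unsigned/long flags, lookahead for doubled l) by a single membership test against the precomputed finite set of 23 valid suffixes that the grammar denotes.
import Mathlib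
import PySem

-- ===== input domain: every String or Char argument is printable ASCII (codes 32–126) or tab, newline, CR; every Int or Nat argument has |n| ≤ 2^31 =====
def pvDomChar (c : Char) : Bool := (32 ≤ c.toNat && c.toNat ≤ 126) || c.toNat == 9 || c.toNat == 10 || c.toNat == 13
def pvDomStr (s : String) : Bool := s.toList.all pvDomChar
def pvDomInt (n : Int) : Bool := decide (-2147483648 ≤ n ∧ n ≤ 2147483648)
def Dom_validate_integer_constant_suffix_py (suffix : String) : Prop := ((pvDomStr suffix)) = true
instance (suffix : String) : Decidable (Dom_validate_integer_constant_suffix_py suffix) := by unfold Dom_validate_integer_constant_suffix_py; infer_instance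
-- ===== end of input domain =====

-- B replaces A's stateful character-by-character flag scan by a membership test
-- in the precomputed finite set of valid suffixes (objective: simpler).

-- ===== PORT A =====
-- A's while loop: the unconsumed characters stand for the index `i`, with the
-- `unsigned`/`long` flags; the `c2 == c` lookahead consumes the doubled letter.
def suffixLoop : List Char → Bool → Bool → Bool
  | [], _, _ => true
  | c :: rest, unsigned, long =>
    if (c == 'u' || c == 'U') && !unsigned then
      suffixLoop rest true long
    else if (c == 'l' || c == 'L') && !long then
      match rest with
      | c2 :: rest2 =>
        if c2 == c then suffixLoop rest2 unsigned true
        else suffixLoop (c2 :: rest2) unsigned true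
      | [] => suffixLoop [] unsigned true
    else false

def validate_integer_constant_suffix_py (suffix : String) : Bool :=
  suffixLoop suffix.toList false false

-- ===== PORT B =====
-- the union of the two frozenset comprehensions of Source B (they are disjoint and
-- duplicate-free, so a plain list holds the distinct elements)
def pvValidSuffixes : List String :=
  (["", "u", "U"].flatMap fun u => ["", "l", "L", "ll", "LL"].map fun l => u ++ l) ++
  (["u", "U"].flatMap fun u => ["l", "L", "ll", "LL"].map fun l => l ++ u)

def validate_integer_constant_suffix_py_alt (suffix : String) : Bool :=
  pvValidSuffixes.contains suffix

-- ===== PRECONDITION & SPEC =====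
def Spec_validate_integer_constant_suffix_py (suffix : String) (out : Bool) : Prop := out = validate_integer_constant_suffix_py_alt suffix
instance (suffix : String) (out : Bool) : Decidable (Spec_validate_integer_constant_suffix_py suffix out) := by unfold Spec_validate_integer_constant_suffix_py; infer_instance

-- ===== CLAIM (what is proved, stated in full; the proofs are below) =====
def Claim_equal_validate_integer_constant_suffix_py : Prop := ∀ (suffix : String), Dom_validate_integer_constant_suffix_py suffix → Spec_validate_integer_constant_suffix_py suffix (validate_integer_constant_suffix_py suffix)

-- ===== LEMMAS AND PROOFS =====

-- once both flags are set, only the empty remainder is accepted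
theorem suffixLoop_tt_tt (cs : List Char) : suffixLoop cs true true = cs.isEmpty := by
  cases cs
  · rfl
  · unfold suffixLoop; simp

-- after the long group, only an optional unsigned letter may follow
theorem suffixLoop_ff_tt (cs : List Char) :
    suffixLoop cs false true = decide (cs = [] ∨ cs = ['u'] ∨ cs = ['U']) := by
  match cs with
  | [] => rfl
  | c :: rest =>
    unfold suffixLoop
    by_cases hu : c = 'u' <;> by_cases hU : c = 'U' <;>
      simp_all [suffixLoop_tt_tt] <;>
      cases rest <;> simp

-- after the unsigned letter, only an optional long group may follow
theorem suffixLoop_tt_ff (cs : List Char) :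
    suffixLoop cs true false =
      decide (cs = [] ∨ cs = ['l'] ∨ cs = ['L'] ∨ cs = ['l','l'] ∨ cs = ['L','L']) := by
  match cs with
  | [] => rfl
  | c :: rest =>
    unfold suffixLoop
    by_cases hl : c = 'l' <;> by_cases hL : c = 'L' <;> simp_all
    · match rest with
      | [] => rw [suffixLoop_tt_tt]; rfl
      | c2 :: rest2 =>
        by_cases h2 : c2 = 'l' <;> simp_all [suffixLoop_tt_tt] <;> (cases rest2 <;> rfl)
    · match rest with
      | [] => rw [suffixLoop_tt_tt]; rfl
      | c2 :: rest2 =>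
        by_cases h2 : c2 = 'L' <;> simp_all [suffixLoop_tt_tt] <;> (cases rest2 <;> rfl)

-- full characterisation of A's loop from the initial state: the 23-word language
theorem suffixLoop_char (cs : List Char) :
    suffixLoop cs false false =
      decide (cs = [] ∨ cs = ['u'] ∨ cs = ['U']
        ∨ cs = ['l'] ∨ cs = ['L'] ∨ cs = ['l','l'] ∨ cs = ['L','L']
        ∨ cs = ['u','l'] ∨ cs = ['u','L'] ∨ cs = ['u','l','l'] ∨ cs = ['u','L','L']
        ∨ cs = ['U','l'] ∨ cs = ['U','L'] ∨ cs = ['U','l','l'] ∨ cs = ['U','L','L']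
        ∨ cs = ['l','u'] ∨ cs = ['l','U'] ∨ cs = ['l','l','u'] ∨ cs = ['l','l','U']
        ∨ cs = ['L','u'] ∨ cs = ['L','U'] ∨ cs = ['L','L','u'] ∨ cs = ['L','L','U']) := by
  match cs with
  | [] => rfl
  | c :: rest =>
    unfold suffixLoop
    by_cases hu : c = 'u' <;> by_cases hU : c = 'U' <;>
      by_cases hl : c = 'l' <;> by_cases hL : c = 'L' <;>
      simp_all [suffixLoop_tt_ff]
    · match rest with
      | [] => rfl
      | c2 :: rest2 =>
        by_cases h2 : c2 = 'l' <;> simp_all [suffixLoop_ff_tt]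
    · match rest with
      | [] => rfl
      | c2 :: rest2 =>
        by_cases h2 : c2 = 'L' <;> simp_all [suffixLoop_ff_tt]

-- `s = String.ofList l` rephrased on the character list
theorem str_eq_ofList (s : String) (l : List Char) :
    (s = String.ofList l) ↔ (s.toList = l) := by
  constructor
  · intro h; subst h; simp
  · intro h; rw [← h, String.ofList_toList]

-- ===== VERDICT (by name: the statement is the Claim_ definition above) =====
set_option maxHeartbeats 1000000 in
theorem validate_integer_constant_suffix_py_spec : Claim_equal_validate_integer_constant_suffix_py := by
  intro s _
  unfold Spec_validate_integer_constant_suffix_py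
  show validate_integer_constant_suffix_py s = validate_integer_constant_suffix_py_alt s
  unfold validate_integer_constant_suffix_py validate_integer_constant_suffix_py_alt
  rw [suffixLoop_char,
    show pvValidSuffixes = ["", "l", "L", "ll", "LL", "u", "ul", "uL", "ull", "uLL", "U",
      "Ul", "UL", "Ull", "ULL", "lu", "Lu", "llu", "LLu", "lU", "LU", "llU", "LLU"] from rfl]
  simp only [List.contains_eq_mem, List.mem_cons, List.not_mem_nil, or_false,
    show ("":String) = String.ofList [] from rfl,
    show ("l":String) = String.ofList ['l'] from rfl,
    show ("L":String) = String.ofList ['L'] from rfl,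
    show ("ll":String) = String.ofList ['l', 'l'] from rfl,
    show ("LL":String) = String.ofList ['L', 'L'] from rfl,
    show ("u":String) = String.ofList ['u'] from rfl,
    show ("ul":String) = String.ofList ['u', 'l'] from rfl,
    show ("uL":String) = String.ofList ['u', 'L'] from rfl,
    show ("ull":String) = String.ofList ['u', 'l', 'l'] from rfl,
    show ("uLL":String) = String.ofList ['u', 'L', 'L'] from rfl,
    show ("U":String) = String.ofList ['U'] from rfl,
    show ("Ul":String) = String.ofList ['U', 'l'] from rfl,
    show ("UL":String) = String.ofList ['U', 'L'] from rfl,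
    show ("Ull":String) = String.ofList ['U', 'l', 'l'] from rfl,
    show ("ULL":String) = String.ofList ['U', 'L', 'L'] from rfl,
    show ("lu":String) = String.ofList ['l', 'u'] from rfl,
    show ("Lu":String) = String.ofList ['L', 'u'] from rfl,
    show ("llu":String) = String.ofList ['l', 'l', 'u'] from rfl,
    show ("LLu":String) = String.ofList ['L', 'L', 'u'] from rfl,
    show ("lU":String) = String.ofList ['l', 'U'] from rfl,
    show ("LU":String) = String.ofList ['L', 'U'] from rfl,
    show ("llU":String) = String.ofList ['l', 'l', 'U'] from rfl,
    show ("LLU":String) = String.ofList ['L', 'L', 'U'] from rfl,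
    str_eq_ofList]
  rw [decide_eq_decide]
  tauto
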